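-- pv_equiv track=rewrite | github.com/DaChosens1/C-Usaco-Work | 2015/Febuary/February 2015 Prob 3/2015_February_3_hopscotch.py | follow_through
-- ===== SOURCE A (Python) =====
-- def follow_through(grid):
--     places = [[0, 0]]
--     while True:
--         changed = False
--         for place in range(len(places)):
--             pos_next_point = []
--             for row in range(places[place][0]+1, len(grid)):
--                 for col in range(places[place][1]+1, len(grid[0])):
--                     if grid[row][col] != grid[places[place][0]][places[place][1]]:
--                         pos_next_point.append([row, col])
--                         changed = True
--             places[place] = pos_next_point if pos_next_point != [] else [places[place]]
--         places = [j for i in places for j in i]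
--         if not changed:
--             break
--
--     answer = 0
--     for place in places:
--         if place == [len(grid)-1, len(grid[0])-1]:
--             answer += 1
--     return answer
-- ===== SOURCE B (Python) =====
-- def follow_through(grid):
--     n, m = len(grid), len(grid[0])
--     memo = {}
--
--     def paths(r, c):
--         # number of color-changing strictly down-right paths from (r, c) to the corner
--         if (r, c) == (n - 1, m - 1):
--             return 1
--         if (r, c) not in memo:
--             memo[(r, c)] = sum(paths(rr, cc)
--                                for rr in range(r + 1, n)
--                                for cc in range(c + 1, m)
--                                if grid[rr][cc] != grid[r][c])
--         return memo[(r, c)]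
--
--     return paths(0, 0) if m else 0
-- ===== Notes on version B (the rewrite author's own statement) =====
-- stated objective: faster
-- what changed: A repeatedly expands a frontier of all partial paths (exponentially many) until every path is maximal and then counts those ending at the corner; B counts the color-changing down-right paths from each cell to the corner with one memoized recursion and returns the count at (0,0).
import Mathlib
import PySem

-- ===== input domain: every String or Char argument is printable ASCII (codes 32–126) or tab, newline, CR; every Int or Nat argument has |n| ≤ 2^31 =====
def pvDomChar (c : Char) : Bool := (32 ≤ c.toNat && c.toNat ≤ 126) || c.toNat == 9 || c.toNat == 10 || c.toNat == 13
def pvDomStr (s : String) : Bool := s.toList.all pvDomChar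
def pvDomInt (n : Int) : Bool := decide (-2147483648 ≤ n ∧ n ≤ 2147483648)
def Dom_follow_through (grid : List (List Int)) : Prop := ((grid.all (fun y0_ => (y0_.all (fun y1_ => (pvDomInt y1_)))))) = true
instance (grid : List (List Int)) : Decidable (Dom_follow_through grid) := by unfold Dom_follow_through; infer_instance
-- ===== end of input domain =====

-- B replaces A's exponential frontier expansion by a memoized count of color-changing
-- down-right paths from each cell to the corner (asymptotically faster; return value only).

-- ===== PORT A =====
-- grid[r][c]; Pre_ guarantees every access A performs is in range (default never used there)
def pvCell (grid : List (List Int)) (r c : Int) : Int :=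
  PySem.List.pyGetD (PySem.List.pyGetD grid r []) c 0

-- the inner double loop of A's pass: pos_next_point for a given place (also the
-- generator B sums over — both Pythons enumerate successors with these two nested loops)
def pvSucc (grid : List (List Int)) (p : Int × Int) : List (Int × Int) :=
  (PySem.List.pyRange (p.1 + 1) (grid.length : Int) 1).flatMap (fun row =>
    ((PySem.List.pyRange (p.2 + 1) ((PySem.List.pyGetD grid 0 []).length : Int) 1).filter
      (fun col => pvCell grid row col != pvCell grid p.1 p.2)).map (fun col => (row, col)))

-- A's 'while True' loop; it terminates within grid.length passes (every non-maximal
-- place has row ≥ number of completed passes), so the fuel below is never exhausted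
def pvLoop (grid : List (List Int)) : Nat → List (Int × Int) → List (Int × Int)
  | 0, places => places
  | fuel + 1, places =>
    let changed := places.any (fun p => !(pvSucc grid p).isEmpty)
    let places' := (places.map (fun p =>
      let s := pvSucc grid p
      if s = [] then [p] else s)).flatten
    if changed then pvLoop grid fuel places' else places'

def follow_through (grid : List (List Int)) : Int :=
  let places := pvLoop grid (grid.length + 1) [(0, 0)]
  places.foldl (fun answer place =>
    if place = ((grid.length : Int) - 1, ((PySem.List.pyGetD grid 0 []).length : Int) - 1)
    then answer + 1 else answer) 0

-- ===== PORT B =====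
-- row bounds of a successor (cited by pvPaths's decreasing_by)
theorem pv_mem_pvSucc_row {grid : List (List Int)} {p q : Int × Int}
    (h : q ∈ pvSucc grid p) : p.1 + 1 ≤ q.1 ∧ q.1 < (grid.length : Int) := by
  simp only [pvSucc, List.mem_flatMap, List.mem_map, List.mem_filter,
    PySem.List.mem_pyRange_one] at h
  obtain ⟨row, hrow, col, _, rfl⟩ := h
  exact hrow

-- B's recursive 'paths(r, c)' (the memo dict only caches these same values)
def pvPaths (grid : List (List Int)) (r c : Int) : Int :=
  if r = (grid.length : Int) - 1 ∧ c = ((PySem.List.pyGetD grid 0 []).length : Int) - 1 then 1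
  else ((pvSucc grid (r, c)).attach.map (fun q => pvPaths grid q.1.1 q.1.2)).sum
termination_by ((grid.length : Int) - r).toNat
decreasing_by
  have h := pv_mem_pvSucc_row q.2
  omega

def follow_through_alt (grid : List (List Int)) : Int :=
  if (PySem.List.pyGetD grid 0 []).length = 0 then 0 else pvPaths grid 0 0

-- ===== PRECONDITION & SPEC =====
-- Pre_ excludes exactly the inputs on which Python A raises IndexError: the empty grid
-- (grid[0]), and grids with ≥ 2 rows and ≥ 2 columns in which some row is shorter than
-- row 0 (A then indexes grid[row][col] out of range; with ≤ 1 row or ≤ 1 column no cell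
-- is ever indexed, so ragged rows are harmless and such grids stay inside Pre_)
def Pre_follow_through (grid : List (List Int)) : Prop :=
  grid ≠ [] ∧ (1 < grid.length ∧ 1 < (PySem.List.pyGetD grid 0 []).length →
    ∀ row ∈ grid, (PySem.List.pyGetD grid 0 []).length ≤ row.length)
instance (grid : List (List Int)) : Decidable (Pre_follow_through grid) := by
  unfold Pre_follow_through; infer_instance

def pvWitness_follow_through : List (List Int) := [[1, 2], [3, 1]]

def Spec_follow_through (grid : List (List Int)) (out : Int) : Prop := out = follow_through_alt grid
instance (grid : List (List Int)) (out : Int) : Decidable (Spec_follow_through grid out) := by unfold Spec_follow_through; infer_instance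

-- ===== CLAIM (what is proved, stated in full; the proofs are below) =====
def Claim_equal_follow_through : Prop := ∀ (grid : List (List Int)), Dom_follow_through grid → Pre_follow_through grid → Spec_follow_through grid (follow_through grid)

-- ===== LEMMAS AND PROOFS =====

-- the corner cell, and the total path weight of a frontier
def pvCorner (grid : List (List Int)) : Int × Int :=
  ((grid.length : Int) - 1, ((PySem.List.pyGetD grid 0 []).length : Int) - 1)

def pvSumG (grid : List (List Int)) (l : List (Int × Int)) : Int :=
  (l.map (fun p => pvPaths grid p.1 p.2)).sum

theorem pv_count_fold (grid : List (List Int)) (l : List (Int × Int)) (a : Int) :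
    l.foldl (fun answer place => if place = pvCorner grid then answer + 1 else answer) a
      = a + (l.map (fun p => if p = pvCorner grid then (1 : Int) else 0)).sum := by
  induction l generalizing a with
  | nil => simp
  | cons x xs ih =>
    simp only [List.foldl_cons, List.map_cons, List.sum_cons, ih]
    split <;> ring


theorem pv_succ_nil_of_row {grid : List (List Int)} {p : Int × Int}
    (h : (grid.length : Int) ≤ p.1 + 1) : pvSucc grid p = [] := by
  simp [pvSucc, PySem.List.pyRange_one_eq_nil h]

theorem pv_succ_nil_of_col {grid : List (List Int)} {p : Int × Int}
    (h : ((PySem.List.pyGetD grid 0 []).length : Int) ≤ p.2 + 1) : pvSucc grid p = [] := by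
  simp [pvSucc, PySem.List.pyRange_one_eq_nil h]

theorem pv_paths_of_succ_nil {grid : List (List Int)} {p : Int × Int}
    (h : pvSucc grid p = []) :
    pvPaths grid p.1 p.2 = if p = pvCorner grid then 1 else 0 := by
  rw [pvPaths]
  have h' : pvSucc grid (p.1, p.2) = [] := by rwa [Prod.mk.eta]
  rw [h']
  simp [pvCorner, Prod.ext_iff]

theorem pv_paths_of_succ_ne {grid : List (List Int)} {p : Int × Int}
    (h : pvSucc grid p ≠ []) :
    pvPaths grid p.1 p.2 = pvSumG grid (pvSucc grid p) := by
  rw [pvPaths]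
  have hcond : ¬ (p.1 = (grid.length : Int) - 1
      ∧ p.2 = ((PySem.List.pyGetD grid 0 []).length : Int) - 1) := by
    rintro ⟨h1, -⟩
    exact h (pv_succ_nil_of_row (by omega))
  rw [if_neg hcond, Prod.mk.eta]
  unfold pvSumG
  rw [List.map_attach_eq_pmap]
  simp


theorem pv_flatten_map_singleton (l : List (Int × Int)) : (l.map (fun p => [p])).flatten = l := by
  induction l with
  | nil => rfl
  | cons x xs ih => simp [ih]

theorem pv_loop_count (grid : List (List Int)) :
    ∀ (fuel : Nat) (places : List (Int × Int)),
      (∀ p ∈ places, pvSucc grid p ≠ [] → (grid.length : Int) ≤ p.1 + fuel) →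
      ((pvLoop grid fuel places).map (fun p => if p = pvCorner grid then (1 : Int) else 0)).sum
        = pvSumG grid places := by
  intro fuel
  induction fuel with
  | zero =>
    intro places hp
    have hall : ∀ p ∈ places, pvSucc grid p = [] := by
      intro p hmem
      by_contra hne
      obtain ⟨q, hq⟩ := List.exists_mem_of_ne_nil _ hne
      have h1 := pv_mem_pvSucc_row hq
      have h2 := hp p hmem hne
      omega
    simp only [pvLoop]
    unfold pvSumG
    congr 1
    exact List.map_congr_left fun p hmem => (pv_paths_of_succ_nil (hall p hmem)).symm
  | succ fuel ih =>
    intro places hp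
    simp only [pvLoop]
    by_cases hch : places.any (fun p => !(pvSucc grid p).isEmpty) = true
    · rw [if_pos hch]
      have hcond : ∀ q ∈ (places.map (fun p =>
          if pvSucc grid p = [] then [p] else pvSucc grid p)).flatten,
          pvSucc grid q ≠ [] → (grid.length : Int) ≤ q.1 + fuel := by
        intro q hq hqne
        rw [List.mem_flatten] at hq
        obtain ⟨l, hl, hql⟩ := hq
        rw [List.mem_map] at hl
        obtain ⟨p, hpmem, rfl⟩ := hl
        by_cases hps : pvSucc grid p = []
        · rw [if_pos hps] at hql
          simp only [List.mem_singleton] at hql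
          subst hql
          exact absurd hps hqne
        · rw [if_neg hps] at hql
          have h1 := pv_mem_pvSucc_row hql
          have h2 := hp p hpmem hps
          omega
      rw [ih _ hcond]
      unfold pvSumG
      simp only [List.map_flatten, List.sum_flatten, List.map_map, Function.comp_def]
      congr 1
      refine List.map_congr_left fun p hmem => ?_
      by_cases hps : pvSucc grid p = []
      · rw [if_pos hps]
        simp
      · rw [if_neg hps, (pv_paths_of_succ_ne hps)]
        rfl
    · rw [if_neg hch]
      have hall : ∀ p ∈ places, pvSucc grid p = [] := by
        intro p hmem
        by_contra hne
        exact hch (List.any_eq_true.mpr ⟨p, hmem, by simp [hne]⟩)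
      have hsing : places.map (fun p => if pvSucc grid p = [] then [p] else pvSucc grid p)
          = places.map (fun p => [p]) :=
        List.map_congr_left fun p hm => by rw [if_pos (hall p hm)]
      rw [hsing, pv_flatten_map_singleton]
      unfold pvSumG
      congr 1
      exact List.map_congr_left fun p hmem => (pv_paths_of_succ_nil (hall p hmem)).symm


theorem pv_follow_through_eq_paths (grid : List (List Int)) :
    follow_through grid = pvPaths grid 0 0 := by
  have hdef : follow_through grid
      = (pvLoop grid (grid.length + 1) [(0, 0)]).foldl
          (fun answer place => if place = pvCorner grid then answer + 1 else answer) 0 := rfl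
  rw [hdef, pv_count_fold, pv_loop_count]
  · simp [pvSumG]
  · intro p hp _
    simp only [List.mem_singleton] at hp
    subst hp
    push_cast
    omega

-- ===== VERDICT (by name: the statement is the Claim_ definition above) =====
theorem follow_through_spec : Claim_equal_follow_through := by
  intro grid _ _
  unfold Spec_follow_through follow_through_alt
  rw [pv_follow_through_eq_paths]
  by_cases hm : (PySem.List.pyGetD grid 0 []).length = 0
  · rw [if_pos hm, pvPaths]
    have hsucc : pvSucc grid ((0 : Int), (0 : Int)) = [] :=
      pv_succ_nil_of_col (by simp [hm])
    rw [if_neg (by rintro ⟨-, h2⟩; rw [hm] at h2; omega), hsucc]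
    simp
  · rw [if_neg hm]
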